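-- pv_equiv track=rewrite | github.com/rogue-agent1/register-alloc | register_alloc.py | liveness
-- ===== SOURCE A (Python) =====
-- def liveness(instrs, defs_list, uses_list):
--     n = len(instrs)
--     live_in = [set() for _ in range(n)]
--     live_out = [set() for _ in range(n)]
--     changed = True
--     while changed:
--         changed = False
--         for i in range(n - 1, -1, -1):
--             new_out = live_in[i + 1] if i + 1 < n else set()
--             new_in = uses_list[i] | (new_out - defs_list[i])
--             if new_in != live_in[i] or new_out != live_out[i]:
--                 live_in[i] = new_in; live_out[i] = new_out; changed = True
--     return live_in, live_out
-- ===== SOURCE B (Python) =====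
-- def liveness(instrs, defs_list, uses_list):
--     # Single backward sweep: on straight-line code one pass from the last
--     # instruction is already the fixed point, so no change-tracking loop.
--     n = len(instrs)
--     live_in, live_out = [], []
--     nxt = set()  # live_in of the instruction just below the current one
--     for i in range(n - 1, -1, -1):
--         out_i = nxt
--         nxt = uses_list[i] | (out_i - defs_list[i])
--         live_in.append(nxt)
--         live_out.append(out_i)
--     live_in.reverse()
--     live_out.reverse()
--     return live_in, live_out
-- ===== Notes on version B (the rewrite author's own statement) =====
-- stated objective: simpler
-- what changed: Replaces the change-tracking fixed-point while-loop over full list rewrites with a single backward sweep that builds live_in/live_out back-to-front carrying only the successor's live-in set, correct because the code is straight-line.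
import Mathlib
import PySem

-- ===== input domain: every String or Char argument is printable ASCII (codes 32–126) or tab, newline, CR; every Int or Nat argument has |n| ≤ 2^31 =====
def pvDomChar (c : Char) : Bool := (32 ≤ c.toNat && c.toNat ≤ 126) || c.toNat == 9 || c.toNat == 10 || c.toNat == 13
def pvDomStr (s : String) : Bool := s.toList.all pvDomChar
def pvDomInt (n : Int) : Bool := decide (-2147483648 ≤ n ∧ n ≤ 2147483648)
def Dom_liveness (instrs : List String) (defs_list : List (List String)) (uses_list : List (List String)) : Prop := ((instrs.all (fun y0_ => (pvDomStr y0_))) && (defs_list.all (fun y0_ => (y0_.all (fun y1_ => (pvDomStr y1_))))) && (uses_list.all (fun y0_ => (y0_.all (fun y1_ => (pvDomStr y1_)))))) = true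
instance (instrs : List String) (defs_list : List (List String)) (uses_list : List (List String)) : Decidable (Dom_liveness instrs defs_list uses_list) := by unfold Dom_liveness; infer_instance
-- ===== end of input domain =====

-- B replaces A's change-tracking fixed-point while-loop with one backward sweep built
-- back-to-front (objective: simpler). Return-value equivalence only; neither mutates its arguments.

-- ===== PORT A =====
-- body of the 'for i in range(n-1,-1,-1)' loop at index i; state = (live_in, live_out, changed).
-- indices i, i+1 are always in range here under Pre_, so getD with default [] is exact;
-- Python's set != is PySem.Set.equal … = false.
def livenessBody (defs_list uses_list : List (List String)) (n : Nat) (i : Nat)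
    (st : List (List String) × List (List String) × Bool) :
    List (List String) × List (List String) × Bool :=
  let li := st.1
  let lo := st.2.1
  let newOut := if i + 1 < n then li.getD (i + 1) [] else []
  let newIn := PySem.Set.union (uses_list.getD i []) (PySem.Set.diff newOut (defs_list.getD i []))
  if PySem.Set.equal newIn (li.getD i []) = false ∨ PySem.Set.equal newOut (lo.getD i []) = false then
    (li.set i newIn, lo.set i newOut, true)
  else
    (li, lo, st.2.2)

-- 'for i in range(n-1,-1,-1)': livenessPass k processes indices k-1, k-2, …, 0.
def livenessPass (defs_list uses_list : List (List String)) (n : Nat) :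
    Nat → List (List String) × List (List String) × Bool → List (List String) × List (List String) × Bool
  | 0, st => st
  | k + 1, st => livenessPass defs_list uses_list n k (livenessBody defs_list uses_list n k st)

-- 'while changed': fuel n+2 suffices — the loop always exits within two passes (proved below).
def livenessLoop (defs_list uses_list : List (List String)) (n : Nat) :
    Nat → List (List String) × List (List String) → List (List String) × List (List String)
  | 0, st => st
  | fuel + 1, st =>
      let r := livenessPass defs_list uses_list n n (st.1, st.2, false)
      if r.2.2 then livenessLoop defs_list uses_list n fuel (r.1, r.2.1) else (r.1, r.2.1)

def liveness (instrs : List String) (defs_list : List (List String)) (uses_list : List (List String)) : List (List String) × List (List String) :=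
  let n := instrs.length
  livenessLoop defs_list uses_list n (n + 2) (List.replicate n [], List.replicate n [])

-- ===== PORT B =====
-- single backward sweep of Source B: k counts down from n; index processed is k-1; 'nxt' is the
-- live_in of the instruction below; results are built back-to-front (Source B appends then reverses).
def livenessAltGo (defs_list uses_list : List (List String)) :
    Nat → List String → List (List String) → List (List String) → List (List String) × List (List String)
  | 0, _, accIn, accOut => (accIn, accOut)
  | k + 1, nxt, accIn, accOut =>
      let outI := nxt
      let inI := PySem.Set.union (uses_list.getD k []) (PySem.Set.diff outI (defs_list.getD k []))
      livenessAltGo defs_list uses_list k inI (inI :: accIn) (outI :: accOut)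

def liveness_alt (instrs : List String) (defs_list : List (List String)) (uses_list : List (List String)) : List (List String) × List (List String) :=
  livenessAltGo defs_list uses_list instrs.length [] [] []

-- ===== PRECONDITION & SPEC =====
-- Pre_ excludes exactly the inputs on which Python A raises IndexError:
-- defs_list or uses_list shorter than instrs (both programs index them at every i < len(instrs)).
def Pre_liveness (instrs : List String) (defs_list : List (List String)) (uses_list : List (List String)) : Prop :=
  instrs.length ≤ defs_list.length ∧ instrs.length ≤ uses_list.length
instance (instrs : List String) (defs_list : List (List String)) (uses_list : List (List String)) : Decidable (Pre_liveness instrs defs_list uses_list) := by unfold Pre_liveness; infer_instance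

def pvWitness_liveness : List String × List (List String) × List (List String) :=
  (["a = b", "c = a"], [["a"], ["c"]], [["b"], ["a"]])

def Spec_liveness (instrs : List String) (defs_list : List (List String)) (uses_list : List (List String)) (out : List (List String) × List (List String)) : Prop := out = liveness_alt instrs defs_list uses_list
instance (instrs : List String) (defs_list : List (List String)) (uses_list : List (List String)) (out : List (List String) × List (List String)) : Decidable (Spec_liveness instrs defs_list uses_list out) := by unfold Spec_liveness; infer_instance

-- ===== CLAIM (what is proved, stated in full; the proofs are below) =====
def Claim_equal_liveness : Prop := ∀ (instrs : List String) (defs_list : List (List String)) (uses_list : List (List String)), Dom_liveness instrs defs_list uses_list → Pre_liveness instrs defs_list uses_list → Spec_liveness instrs defs_list uses_list (liveness instrs defs_list uses_list)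

-- ===== LEMMAS AND PROOFS =====

-- Mfun d u n k = live_in of instruction n-k (Mfun … 0 = live-in past the end = ∅).
def Mfun (defs_list uses_list : List (List String)) (n : Nat) : Nat → List String
  | 0 => []
  | k + 1 => PySem.Set.union (uses_list.getD (n - (k + 1)) []) (PySem.Set.diff (Mfun defs_list uses_list n k) (defs_list.getD (n - (k + 1)) []))

-- the fixed-point lists: Fin_[i] = live_in[i], Fout_[i] = live_out[i]
def Fin_ (d u : List (List String)) (n : Nat) : List (List String) :=
  (List.range n).map (fun i => Mfun d u n (n - i))
def Fout_ (d u : List (List String)) (n : Nat) : List (List String) :=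
  (List.range n).map (fun i => Mfun d u n (n - 1 - i))

theorem Fin_length (d u : List (List String)) (n : Nat) : (Fin_ d u n).length = n := by
  simp [Fin_]

theorem Fout_length (d u : List (List String)) (n : Nat) : (Fout_ d u n).length = n := by
  simp [Fout_]

theorem Fin_getD (d u : List (List String)) (n i : Nat) (h : i < n) :
    (Fin_ d u n).getD i [] = Mfun d u n (n - i) := by
  simp [Fin_, List.getD_eq_getElem?_getD, h]

theorem Fout_getD (d u : List (List String)) (n i : Nat) (h : i < n) :
    (Fout_ d u n).getD i [] = Mfun d u n (n - 1 - i) := by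
  simp [Fout_, List.getD_eq_getElem?_getD, h]

theorem Mfun_rec (d u : List (List String)) (n i : Nat) (h : i < n) :
    Mfun d u n (n - i) =
      PySem.Set.union (u.getD i []) (PySem.Set.diff (Mfun d u n (n - 1 - i)) (d.getD i [])) := by
  obtain ⟨k, hk⟩ : ∃ k, n - i = k + 1 := ⟨n - i - 1, by omega⟩
  have h1 : n - (k + 1) = i := by omega
  have h2 : n - 1 - i = k := by omega
  rw [hk, h2]
  simp [Mfun, h1]

theorem Set_equal_self {s : List String} : PySem.Set.equal s s = true := by
  simp [PySem.Set.equal, PySem.Set.issubset]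

-- out value computed by the body at index k equals Fout_[k], given live_in above k is final
theorem newOut_eq (d u : List (List String)) (n k : Nat) (hk : k < n)
    (li : List (List String)) (hget : k + 1 < n → li.getD (k + 1) [] = Mfun d u n (n - (k + 1))) :
    (if k + 1 < n then li.getD (k + 1) [] else []) = Mfun d u n (n - 1 - k) := by
  by_cases h : k + 1 < n
  · simp only [h, if_pos]
    rw [hget h]
    congr 1
    omega
  · simp only [h, if_false]
    have : n - 1 - k = 0 := by omega
    rw [this]
    rfl

-- ===== the fixed point is stable under one pass =====
theorem pass_fixed (d u : List (List String)) (n : Nat) :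
    ∀ k, k ≤ n → ∀ ch, livenessPass d u n k (Fin_ d u n, Fout_ d u n, ch) = (Fin_ d u n, Fout_ d u n, ch) := by
  intro k
  induction k with
  | zero => intro _ ch; rfl
  | succ k ih =>
      intro hk ch
      have hkn : k < n := by omega
      show livenessPass d u n k (livenessBody d u n k (Fin_ d u n, Fout_ d u n, ch)) = _
      have hout : (if k + 1 < n then (Fin_ d u n).getD (k + 1) [] else []) = Mfun d u n (n - 1 - k) :=
        newOut_eq d u n k hkn _ (fun h => Fin_getD d u n (k + 1) h)
      have hbody : livenessBody d u n k (Fin_ d u n, Fout_ d u n, ch) = (Fin_ d u n, Fout_ d u n, ch) := by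
        unfold livenessBody
        simp only [hout]
        rw [← Mfun_rec d u n k hkn, ← Fin_getD d u n k hkn]
        rw [show Mfun d u n (n - 1 - k) = (Fout_ d u n).getD k [] from (Fout_getD d u n k hkn).symm]
        simp [Set_equal_self]
      rw [hbody]
      exact ih (by omega) ch

-- partially-initialized state: indices < k still hold the initial ∅, indices ≥ k are final
theorem stage_getD (L : List (List String)) (k j : Nat) :
    (List.replicate k ([] : List String) ++ L.drop k).getD j [] =
      if j < k then [] else L.getD j [] := by
  by_cases h : j < k
  · simp [h, List.getD_eq_getElem?_getD, List.getElem?_append]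
  · have hd : (List.replicate k ([] : List String) ++ L.drop k)[j]? = (L.drop k)[j - k]? := by
      rw [List.getElem?_append_right (by simp; omega)]
      simp
    have hd2 : (L.drop k)[j - k]? = L[j]? := by
      rw [List.getElem?_drop]
      congr 1
      omega
    simp [h, List.getD_eq_getElem?_getD, hd, hd2]

theorem stage_set (L : List (List String)) (k : Nat) (hk : k < L.length) :
    (List.replicate (k + 1) ([] : List String) ++ L.drop (k + 1)).set k L[k] =
      List.replicate k ([] : List String) ++ L.drop k := by
  have hrep : List.replicate (k + 1) ([] : List String) = List.replicate k [] ++ [[]] := by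
    simp [List.replicate_succ']
  rw [hrep, List.append_assoc]
  rw [List.set_append_right _ _ (by simp), List.drop_eq_getElem_cons hk]
  simp

-- ===== one pass from the initial all-∅ state reaches the fixed point =====
theorem pass_init (d u : List (List String)) (n : Nat) :
    ∀ k, k ≤ n → ∀ ch, ∃ ch',
      livenessPass d u n k
        (List.replicate k [] ++ (Fin_ d u n).drop k,
         List.replicate k [] ++ (Fout_ d u n).drop k, ch) =
      (Fin_ d u n, Fout_ d u n, ch') := by
  intro k
  induction k with
  | zero => intro _ ch; exact ⟨ch, by simp [livenessPass]⟩
  | succ k ih =>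
      intro hk ch
      have hkn : k < n := by omega
      show ∃ ch', livenessPass d u n k (livenessBody d u n k _) = _
      have hout : (if k + 1 < n then (List.replicate (k + 1) ([] : List String) ++ (Fin_ d u n).drop (k + 1)).getD (k + 1) [] else [])
          = Mfun d u n (n - 1 - k) := by
        apply newOut_eq d u n k hkn
        intro h
        rw [stage_getD]
        simp only [lt_irrefl, if_false]
        exact Fin_getD d u n (k + 1) h
      have hinval : PySem.Set.union (u.getD k []) (PySem.Set.diff (Mfun d u n (n - 1 - k)) (d.getD k []))
          = Mfun d u n (n - k) := (Mfun_rec d u n k hkn).symm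
      have hliK : (List.replicate (k + 1) ([] : List String) ++ (Fin_ d u n).drop (k + 1)).getD k [] = [] := by
        rw [stage_getD]; simp
      have hloK : (List.replicate (k + 1) ([] : List String) ++ (Fout_ d u n).drop (k + 1)).getD k [] = [] := by
        rw [stage_getD]; simp
      have hFinK : (Fin_ d u n)[k]'(by rw [Fin_length]; exact hkn) = Mfun d u n (n - k) := by
        simp [Fin_]
      have hFoutK : (Fout_ d u n)[k]'(by rw [Fout_length]; exact hkn) = Mfun d u n (n - 1 - k) := by
        simp [Fout_]
      unfold livenessBody
      simp only [hout, hliK, hloK, hinval]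
      by_cases hcond : PySem.Set.equal (Mfun d u n (n - k)) [] = false ∨ PySem.Set.equal (Mfun d u n (n - 1 - k)) [] = false
      · simp only [hcond, if_pos]
        have e1 : (List.replicate (k + 1) ([] : List String) ++ (Fin_ d u n).drop (k + 1)).set k (Mfun d u n (n - k))
            = List.replicate k [] ++ (Fin_ d u n).drop k := by
          rw [← hFinK]; exact stage_set _ k (by rw [Fin_length]; exact hkn)
        have e2 : (List.replicate (k + 1) ([] : List String) ++ (Fout_ d u n).drop (k + 1)).set k (Mfun d u n (n - 1 - k))
            = List.replicate k [] ++ (Fout_ d u n).drop k := by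
          rw [← hFoutK]; exact stage_set _ k (by rw [Fout_length]; exact hkn)
        rw [e1, e2]
        exact ih (by omega) true
      · simp only [hcond, if_false]
        push Not at hcond
        obtain ⟨h1, h2⟩ := hcond
        have h1' : Mfun d u n (n - k) = [] := by
          have := (PySem.Set.equal_iff (Mfun d u n (n - k)) []).mp (by revert h1; cases PySem.Set.equal (Mfun d u n (n - k)) ([] : List String) <;> simp)
          exact List.eq_nil_iff_forall_not_mem.mpr (fun x hx => by simpa using (this x).mp hx)
        have h2' : Mfun d u n (n - 1 - k) = [] := by
          have := (PySem.Set.equal_iff (Mfun d u n (n - 1 - k)) []).mp (by revert h2; cases PySem.Set.equal (Mfun d u n (n - 1 - k)) ([] : List String) <;> simp)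
          exact List.eq_nil_iff_forall_not_mem.mpr (fun x hx => by simpa using (this x).mp hx)
        have e1 : List.replicate (k + 1) ([] : List String) ++ (Fin_ d u n).drop (k + 1)
            = List.replicate k [] ++ (Fin_ d u n).drop k := by
          conv_rhs => rw [List.drop_eq_getElem_cons (show k < (Fin_ d u n).length by
            rw [Fin_length]; exact hkn)]
          rw [hFinK, h1', List.replicate_succ', List.append_assoc]
          rfl
        have e2 : List.replicate (k + 1) ([] : List String) ++ (Fout_ d u n).drop (k + 1)
            = List.replicate k [] ++ (Fout_ d u n).drop k := by
          conv_rhs => rw [List.drop_eq_getElem_cons (show k < (Fout_ d u n).length by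
            rw [Fout_length]; exact hkn)]
          rw [hFoutK, h2', List.replicate_succ', List.append_assoc]
          rfl
        rw [e1, e2]
        exact ih (by omega) ch

-- ===== A computes the fixed point =====
theorem liveness_eq_fixed (instrs : List String) (d u : List (List String)) :
    liveness instrs d u = (Fin_ d u instrs.length, Fout_ d u instrs.length) := by
  set n := instrs.length with hn
  have hinit_in : List.replicate n ([] : List String) = List.replicate n [] ++ (Fin_ d u n).drop n := by
    rw [List.drop_of_length_le (by rw [Fin_length])]
    simp
  have hinit_out : List.replicate n ([] : List String) = List.replicate n [] ++ (Fout_ d u n).drop n := by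
    rw [List.drop_of_length_le (by rw [Fout_length])]
    simp
  have step : ∀ (fuel : Nat) (st : List (List String) × List (List String)),
      livenessLoop d u n (fuel + 1) st =
        (let r := livenessPass d u n n (st.1, st.2, false);
         if r.2.2 then livenessLoop d u n fuel (r.1, r.2.1) else (r.1, r.2.1)) :=
    fun fuel st => rfl
  obtain ⟨ch1, hpass1⟩ := pass_init d u n n le_rfl false
  rw [← hinit_in, ← hinit_out] at hpass1
  show livenessLoop d u n (n + 1 + 1) (List.replicate n [], List.replicate n []) = _
  rw [step]
  simp only [hpass1]
  cases ch1 with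
  | false => simp
  | true =>
      simp only [if_pos]
      rw [step]
      rw [pass_fixed d u n n le_rfl false]
      simp

-- ===== B computes the fixed point =====
theorem altGo_eq (d u : List (List String)) (n : Nat) :
    ∀ k, k ≤ n → ∀ accIn accOut,
      livenessAltGo d u k (Mfun d u n (n - k)) accIn accOut =
        ((Fin_ d u n).take k ++ accIn, (Fout_ d u n).take k ++ accOut) := by
  intro k
  induction k with
  | zero => intro _ accIn accOut; simp [livenessAltGo]
  | succ k ih =>
      intro hk accIn accOut
      have hkn : k < n := by omega
      have hnk : n - (k + 1) = n - 1 - k := by omega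
      show livenessAltGo d u k
          (PySem.Set.union (u.getD k []) (PySem.Set.diff (Mfun d u n (n - (k + 1))) (d.getD k [])))
          (_ :: accIn) (_ :: accOut) = _
      rw [hnk, ← Mfun_rec d u n k hkn]
      rw [ih (by omega)]
      have hFinK : (Fin_ d u n)[k]'(by rw [Fin_length]; exact hkn) = Mfun d u n (n - k) := by
        simp [Fin_]
      have hFoutK : (Fout_ d u n)[k]'(by rw [Fout_length]; exact hkn) = Mfun d u n (n - 1 - k) := by
        simp [Fout_]
      rw [List.take_add_one, List.take_add_one]
      have g1 : (Fin_ d u n)[k]? = some (Mfun d u n (n - k)) := by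
        rw [List.getElem?_eq_getElem (by rw [Fin_length]; exact hkn), hFinK]
      have g2 : (Fout_ d u n)[k]? = some (Mfun d u n (n - 1 - k)) := by
        rw [List.getElem?_eq_getElem (by rw [Fout_length]; exact hkn), hFoutK]
      simp [g1, g2]

theorem liveness_alt_eq_fixed (instrs : List String) (d u : List (List String)) :
    liveness_alt instrs d u = (Fin_ d u instrs.length, Fout_ d u instrs.length) := by
  set n := instrs.length with hn
  have h0 : ([] : List String) = Mfun d u n (n - n) := by rw [Nat.sub_self]; rfl
  show livenessAltGo d u n [] [] [] = _
  rw [h0, altGo_eq d u n n le_rfl [] []]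
  rw [List.take_of_length_le (by rw [Fin_length]), List.take_of_length_le (by rw [Fout_length])]
  simp

-- ===== VERDICT (by name: the statement is the Claim_ definition above) =====
theorem liveness_spec : Claim_equal_liveness := by
  intro instrs defs_list uses_list _ _
  unfold Spec_liveness
  rw [liveness_eq_fixed, liveness_alt_eq_fixed]
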